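-- pv_equiv track=rewrite | github.com/sandipmakwana01/05dec_2023_Sandip_Python | Module 3 (Collections, functions and Modules)/44 combinations.py | combinations
-- ===== SOURCE A (Python) =====
-- from itertools import product
--
-- def combinations(x):
--
--     m = [
--         x[key]
--         for key in sorted(x.keys())
--         ]
--
--     n = list(product(*m))
--
--     p = [
--         ''.join(o)
--         for o in n
--         ]
--
--     return p
-- ===== SOURCE B (Python) =====
-- def combinations(x):
--     # Mixed-radix "odometer": the i-th combination is obtained by decoding i
--     # into digits (least-significant digit = last sorted key, fastest-varying),
--     # picking one item per key; no Cartesian-product enumeration is built.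
--     keys = sorted(x)
--     sizes = [len(x[k]) for k in keys]
--     total = 1
--     for s in sizes:
--         total *= s
--     out = []
--     for i in range(total):
--         rem = i
--         parts = []
--         for k, s in zip(reversed(keys), reversed(sizes)):
--             rem, d = divmod(rem, s)
--             parts.append(x[k][d])
--         out.append(''.join(reversed(parts)))
--     return out
-- ===== Notes on version B (the rewrite author's own statement) =====
-- stated objective: alternative
-- what changed: Replaces itertools.product followed by a join pass with mixed-radix index decoding: it computes the total count of combinations and, for each index i, reconstructs the i-th combination by repeated divmod of i by the value-list sizes, never materializing product tuples.
import Mathlib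
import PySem

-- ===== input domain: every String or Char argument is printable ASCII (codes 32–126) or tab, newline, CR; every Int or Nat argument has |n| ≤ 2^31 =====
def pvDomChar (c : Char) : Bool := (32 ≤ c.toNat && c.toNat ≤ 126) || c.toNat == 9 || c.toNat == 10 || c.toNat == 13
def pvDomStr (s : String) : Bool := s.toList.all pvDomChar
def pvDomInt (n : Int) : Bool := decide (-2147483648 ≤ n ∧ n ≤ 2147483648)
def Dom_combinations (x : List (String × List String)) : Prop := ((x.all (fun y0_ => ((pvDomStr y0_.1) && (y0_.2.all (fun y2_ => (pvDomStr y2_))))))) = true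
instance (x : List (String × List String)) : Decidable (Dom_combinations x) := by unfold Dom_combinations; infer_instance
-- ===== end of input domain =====

-- B replaces itertools.product + join with mixed-radix index decoding: it counts the
-- combinations and, for each index i, reconstructs the i-th joined string by repeated
-- divmod of i by the value-list sizes, never materializing product tuples (alternative).

-- ===== PORT A =====
-- itertools.product(*m): first factor slowest-varying
def pvProd : List (List String) → List (List String)
  | [] => [[]]
  | l :: ls => l.flatMap (fun a => (pvProd ls).map (fun o => a :: o))

def combinations (x : List (String × List String)) : List String :=
  let d := PySem.Dict.ofList x
  -- x[key] with key drawn from x.keys() always hits, so getD with default [] is exact here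
  let m := (PySem.List.sorted d.keys (fun k => k) false).map (fun k => d.getD k [])
  let n := pvProd m
  n.map (fun o => PySem.Str.join "" o)

-- ===== PORT B =====
def combinations_alt (x : List (String × List String)) : List String :=
  let d := PySem.Dict.ofList x
  let keys := PySem.List.sorted d.keys (fun k => k) false
  let sizes := keys.map (fun k => (Int.ofNat (d.getD k []).length))
  let total := sizes.foldl (· * ·) 1
  (PySem.List.pyRange 0 total 1).map (fun i =>
    -- inner loop: rem, dd = divmod(rem, s); parts.append(x[k][dd]); it only runs when
    -- total > 0, hence every s > 0 there, so floordiv/mod are exactly divmod and the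
    -- index dd is always in range (the getD "" default is never taken)
    let st := (List.zip keys.reverse sizes.reverse).foldl
      (fun st ks =>
        ((PySem.Int.floordiv st.1 ks.2),
          st.2 ++ [((PySem.List.pyGet? (d.getD ks.1 []) (PySem.Int.mod st.1 ks.2)).getD "")]))
      (i, ([] : List String))
    PySem.Str.join "" st.2.reverse)

-- ===== PRECONDITION & SPEC =====
def Spec_combinations (x : List (String × List String)) (out : List String) : Prop := out = combinations_alt x
instance (x : List (String × List String)) (out : List String) : Decidable (Spec_combinations x out) := by unfold Spec_combinations; infer_instance

-- ===== CLAIM (what is proved, stated in full; the proofs are below) =====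
def Claim_equal_combinations : Prop := ∀ (x : List (String × List String)), Dom_combinations x → Spec_combinations x (combinations x)

-- ===== LEMMAS AND PROOFS =====

-- one divmod step of B's inner loop, abstracted over the value list
def gStep (st : Int × List String) (l : List String) : Int × List String :=
  (PySem.Int.floordiv st.1 (Int.ofNat l.length),
    st.2 ++ [((PySem.List.pyGet? l (PySem.Int.mod st.1 (Int.ofNat l.length))).getD "")])

-- B's decoded combination for index i over the value lists ls
def gDec (ls : List (List String)) (i : Int) : List String :=
  ((ls.reverse.foldl gStep (i, [])).2).reverse

theorem gStep_foldl_shift (L : List (List String)) (i : Int) (p : List String) :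
    L.foldl gStep (i, p) = ((L.foldl gStep (i, [])).1, p ++ (L.foldl gStep (i, [])).2) := by
  induction L generalizing i p with
  | nil => simp
  | cons a t ih =>
      simp only [List.foldl_cons, gStep, List.nil_append]
      rw [ih, ih (PySem.Int.floordiv i (Int.ofNat a.length))
        [(PySem.List.pyGet? a (PySem.Int.mod i (Int.ofNat a.length))).getD ""]]
      simp

theorem gDec_append (ls : List (List String)) (l : List String) (i : Int) :
    gDec (ls ++ [l]) i =
      gDec ls (PySem.Int.floordiv i (Int.ofNat l.length)) ++
        [((PySem.List.pyGet? l (PySem.Int.mod i (Int.ofNat l.length))).getD "")] := by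
  unfold gDec
  rw [List.reverse_append]
  simp only [List.reverse_cons, List.reverse_nil, List.nil_append, List.singleton_append,
    List.foldl_cons]
  rw [show gStep (i, []) l = ((PySem.Int.floordiv i (Int.ofNat l.length)),
        [((PySem.List.pyGet? l (PySem.Int.mod i (Int.ofNat l.length))).getD "")]) from rfl]
  rw [gStep_foldl_shift]
  simp

theorem pvProd_append (ls : List (List String)) (l : List String) :
    pvProd (ls ++ [l]) = (pvProd ls).flatMap (fun o => l.map (fun a => o ++ [a])) := by
  induction ls with
  | nil => induction l <;> simp_all [pvProd]
  | cons h t ih =>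
      simp only [List.cons_append, pvProd, ih]
      simp [List.map_flatMap, List.flatMap_map, List.flatMap_assoc, Function.comp_def]

theorem range_mul_flatMap (N s : Nat) :
    List.range (N * s) = (List.range N).flatMap (fun q => (List.range s).map (fun r => q * s + r)) := by
  induction N with
  | zero => simp
  | succ n ih => rw [Nat.succ_mul, List.range_add, ih, List.range_succ, List.flatMap_append]; simp

theorem map_range_getD (l : List String) :
    (List.range l.length).map (fun r => l.getD r "") = l := by
  apply List.ext_getElem
  · simp
  · intro i h1 h2
    simp at h1
    simp [List.getElem?_eq_getElem (by simpa using h2), List.getD_eq_getElem?_getD]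

theorem gDec_main (ls : List (List String)) :
    (List.range ((ls.map List.length).prod)).map (fun n => gDec ls (Int.ofNat n)) = pvProd ls := by
  induction ls using List.reverseRecOn with
  | nil => decide
  | append_singleton ls l ih =>
      have hprod : ((ls ++ [l]).map List.length).prod = (ls.map List.length).prod * l.length := by
        simp
      rw [hprod]
      rw [show ((List.range ((ls.map List.length).prod * l.length)).map
            (fun n => gDec (ls ++ [l]) (Int.ofNat n)))
          = ((List.range ((ls.map List.length).prod * l.length)).map Int.ofNat).map
            (fun n : Int => gDec (ls ++ [l]) n) from by rw [List.map_map]; rfl]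
      rw [range_mul_flatMap, List.map_flatMap, List.map_flatMap]
      have hq : ∀ q : Nat,
          (((List.range l.length).map (fun r => q * l.length + r)).map Int.ofNat).map
              (fun n : Int => gDec (ls ++ [l]) n)
            = l.map (fun a => gDec ls (q : Int) ++ [a]) := by
        intro q
        rw [List.map_map, List.map_map]
        have h1 : ∀ r ∈ List.range l.length,
            (((fun n : Int => gDec (ls ++ [l]) n) ∘ Int.ofNat) ∘ (fun r => q * l.length + r)) r
              = (fun a => gDec ls (q : Int) ++ [a]) (l.getD r "") := by
          intro r hr
          have hrs : r < l.length := List.mem_range.mp hr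
          have hs : 0 < l.length := by omega
          simp only [Function.comp_apply]
          rw [gDec_append]
          have hdiv : PySem.Int.floordiv (Int.ofNat (q * l.length + r)) (Int.ofNat l.length)
              = (q : Int) := by
            rw [show (Int.ofNat (q * l.length + r)) = ((q * l.length + r : Nat) : Int) from rfl,
              show (Int.ofNat l.length) = ((l.length : Nat) : Int) from rfl,
              PySem.Int.floordiv_natCast]
            congr 1
            rw [Nat.mul_comm q l.length, Nat.mul_add_div hs, Nat.div_eq_of_lt hrs]
            omega
          have hmod : PySem.Int.mod (Int.ofNat (q * l.length + r)) (Int.ofNat l.length)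
              = (r : Int) := by
            rw [show (Int.ofNat (q * l.length + r)) = ((q * l.length + r : Nat) : Int) from rfl,
              show (Int.ofNat l.length) = ((l.length : Nat) : Int) from rfl,
              PySem.Int.mod_natCast]
            congr 1
            rw [Nat.mul_comm q l.length, Nat.mul_add_mod, Nat.mod_eq_of_lt hrs]
          rw [hdiv, hmod]
          congr 1
          rw [PySem.List.pyGet?_natCast]
          simp [List.getElem?_eq_getElem hrs, List.getD_eq_getElem?_getD]
        rw [List.map_congr_left h1]
        rw [show (fun r => (fun a => gDec ls (q : Int) ++ [a]) (l.getD r ""))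
              = ((fun a => gDec ls (q : Int) ++ [a]) ∘ (fun r => l.getD r "")) from rfl]
        rw [← List.map_map, map_range_getD]
      simp only [hq]
      rw [pvProd_append, ← ih]
      rw [show ((List.range ((ls.map List.length).prod)).map (fun n => gDec ls (Int.ofNat n)))
          = ((List.range ((ls.map List.length).prod)).map Int.ofNat).map
            (fun n : Int => gDec ls n) from by rw [List.map_map]; rfl]
      rw [List.flatMap_map, List.flatMap_map]
      rfl

theorem foldl_prod_cast (keys : List String) (f : String → Nat) :
    (keys.map (fun k => Int.ofNat (f k))).foldl (· * ·) 1 = Int.ofNat ((keys.map f).prod) := by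
  rw [← List.prod_eq_foldl]
  simp [Nat.cast_list_prod, List.map_map, Function.comp_def]

theorem bridge (d : PySem.Dict String (List String)) (keys : List String) :
    (PySem.List.pyRange 0 ((keys.map (fun k => Int.ofNat (d.getD k []).length)).foldl (· * ·) 1) 1).map
      (fun i =>
        let st := (List.zip keys.reverse ((keys.map (fun k => Int.ofNat (d.getD k []).length)).reverse)).foldl
          (fun st ks =>
            ((PySem.Int.floordiv st.1 ks.2),
              st.2 ++ [((PySem.List.pyGet? (d.getD ks.1 []) (PySem.Int.mod st.1 ks.2)).getD "")]))
          (i, ([] : List String))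
        PySem.Str.join "" st.2.reverse)
    = (pvProd (keys.map (fun k => d.getD k []))).map (fun o => PySem.Str.join "" o) := by
  have hzip : List.zip keys.reverse ((keys.map (fun k => Int.ofNat (d.getD k []).length)).reverse)
      = keys.reverse.map (fun k => (k, Int.ofNat (d.getD k []).length)) := by
    rw [← List.map_reverse, List.map_prod_left_eq_zip]
  have hfold : ∀ i : Int,
      ((List.zip keys.reverse ((keys.map (fun k => Int.ofNat (d.getD k []).length)).reverse)).foldl
        (fun st ks =>
          ((PySem.Int.floordiv st.1 ks.2),
            st.2 ++ [((PySem.List.pyGet? (d.getD ks.1 []) (PySem.Int.mod st.1 ks.2)).getD "")]))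
        (i, ([] : List String)))
      = ((keys.map (fun k => d.getD k [])).reverse.foldl gStep (i, [])) := by
    intro i
    rw [hzip, List.foldl_map, ← List.map_reverse, List.foldl_map]
    rfl
  rw [foldl_prod_cast keys (fun k => (d.getD k []).length)]
  rw [show (keys.map fun k => (d.getD k []).length)
        = ((keys.map (fun k => d.getD k [])).map List.length) from by
        simp [List.map_map, Function.comp_def]]
  rw [PySem.List.pyRange_one]
  simp only [sub_zero, zero_add, hfold]
  rw [List.map_map]
  rw [← gDec_main (keys.map (fun k => d.getD k []))]
  simp [List.map_map, Function.comp_def, gDec]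
  congr 1
  rw [show (keys.map (fun x => ((d.getD x []).length : Int)))
        = ((keys.map (fun x => (d.getD x []).length)).map (fun n : Nat => (n : Int))) from by
      simp [List.map_map]]
  rw [← Nat.cast_list_prod, Int.toNat_natCast]

-- ===== VERDICT (by name: the statement is the Claim_ definition above) =====
theorem combinations_spec : Claim_equal_combinations := by
  intro x _
  unfold Spec_combinations combinations combinations_alt
  dsimp only
  exact (bridge (PySem.Dict.ofList x)
    (PySem.List.sorted (PySem.Dict.ofList x).keys (fun k => k) false)).symm
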